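-- pv_equiv track=rewrite | github.com/karistin/HTTP_SERVER_RFC1945 | server/parser.py | is_HTTP_Version
-- ===== SOURCE A (Python) =====
-- def is_digit(octet):
--     if len(octet) != 1:
--         return False
--     return 48 <= ord(octet) < 58
--
-- def is_HTTP_Version(octet):
--     if octet[0:5] != "HTTP/":
--         return False
--     if octet.count(".") > 1:
--         return False
--     if octet.find(".") == 5:
--         return False
--     for i in range(5, octet.find(".")):
--         if is_digit(octet[i]) == False:
--             return False
--     for i in range(octet.find(".")+1,  len(octet)):
--         if is_digit(octet[i]) == False:
--             return False
--     return True
-- ===== SOURCE B (Python) =====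
-- def is_HTTP_Version(octet):
--     if not octet.startswith("HTTP/"):
--         return False
--     seen_dot = False
--     major_len = 0
--     for c in octet[5:]:
--         if c == ".":
--             if seen_dot:
--                 return False
--             seen_dot = True
--         elif "0" <= c <= "9":
--             if not seen_dot:
--                 major_len += 1
--         else:
--             return False
--     return seen_dot and major_len > 0
-- ===== Notes on version B (the rewrite author's own statement) =====
-- stated objective: alternative
-- what changed: A scans with find/count plus two index-range digit loops calling a one-char is_digit helper; B makes a single left-to-right pass over the characters after the five-character protocol prefix with a seen-dot flag and a major-digit counter.
import Mathlib
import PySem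

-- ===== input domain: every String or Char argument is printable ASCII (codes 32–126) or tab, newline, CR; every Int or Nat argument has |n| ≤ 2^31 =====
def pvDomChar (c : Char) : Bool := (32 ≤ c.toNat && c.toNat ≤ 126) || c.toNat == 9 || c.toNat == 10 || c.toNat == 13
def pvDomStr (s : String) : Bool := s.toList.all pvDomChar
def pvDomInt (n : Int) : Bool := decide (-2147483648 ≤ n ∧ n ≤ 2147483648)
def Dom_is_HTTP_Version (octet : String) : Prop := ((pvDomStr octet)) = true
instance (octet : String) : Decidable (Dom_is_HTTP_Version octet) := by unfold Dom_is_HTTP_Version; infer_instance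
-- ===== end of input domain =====

-- B replaces A's find/count plus two index-range digit loops by one left-to-right scan over the characters after the five-character protocol prefix (alternative decomposition, same cost).

-- ===== PORT A =====
-- helper is_digit(octet) of A: length-1 check, then 48 <= ord(octet) < 58
def pvIsDigitA (cs : List Char) : Bool :=
  if cs.length ≠ 1 then false
  else decide (48 ≤ cs.headI.toNat ∧ cs.headI.toNat < 58)

-- A's two 'for i in range(...): if is_digit(octet[i]) == False: return False' loops
def pvScanA (cs : List Char) : List Int → Bool
  | [] => true
  | i :: is =>
    match PySem.List.pyGet? cs i with
    | some c => if pvIsDigitA [c] = false then false else pvScanA cs is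
    | none => false   -- IndexError; unreachable: both ranges stay inside the string

def is_HTTP_Version (octet : String) : Bool :=
  if PySem.Chars.slice octet.toList (some 0) (some 5) ≠ "HTTP/".toList then false
  else if 1 < PySem.Chars.count octet.toList ['.'] then false
  else if PySem.Chars.find octet.toList ['.'] = 5 then false
  else if pvScanA octet.toList (PySem.List.pyRange 5 (PySem.Chars.find octet.toList ['.']) 1) = false then false
  else if pvScanA octet.toList (PySem.List.pyRange (PySem.Chars.find octet.toList ['.'] + 1) (octet.toList.length : Int) 1) = false then false
  else true

-- ===== PORT B =====
def pvDigit (c : Char) : Bool := decide ('0' ≤ c ∧ c ≤ '9')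

-- B's single scan over octet[5:]: seen_dot flag and major-digit counter
def pvScanB : List Char → Bool → Nat → Bool
  | [], seen, mlen => seen && decide (0 < mlen)
  | c :: rest, seen, mlen =>
    if c = '.' then (if seen then false else pvScanB rest true mlen)
    else if pvDigit c then pvScanB rest seen (if seen then mlen else mlen + 1)
    else false

def is_HTTP_Version_alt (octet : String) : Bool :=
  if !(PySem.Chars.startswith octet.toList "HTTP/".toList) then false
  else pvScanB (PySem.Chars.slice octet.toList (some 5) none) false 0

-- ===== PRECONDITION & SPEC =====
def Spec_is_HTTP_Version (octet : String) (out : Bool) : Prop := out = is_HTTP_Version_alt octet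
instance (octet : String) (out : Bool) : Decidable (Spec_is_HTTP_Version octet out) := by unfold Spec_is_HTTP_Version; infer_instance

-- ===== CLAIM (what is proved, stated in full; the proofs are below) =====
def Claim_equal_is_HTTP_Version : Prop := ∀ (octet : String), Dom_is_HTTP_Version octet → Spec_is_HTTP_Version octet (is_HTTP_Version octet)

-- ===== LEMMAS AND PROOFS =====

theorem pvIsDigitA_eq (c : Char) : pvIsDigitA [c] = pvDigit c := by
  unfold pvIsDigitA pvDigit
  rw [if_neg (by simp)]
  simp only [List.headI]
  rw [decide_eq_decide]
  rw [Char.le_def, Char.le_def, UInt32.le_iff_toNat_le, UInt32.le_iff_toNat_le]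
  have h0 : ('0').val.toNat = 48 := by decide
  have h9 : ('9').val.toNat = 57 := by decide
  rw [h0, h9]
  unfold Char.toNat
  omega

-- s.count(d) for a single character d is the number of occurrences of d
theorem count_go_singleton (d : Char) (fuel : Nat) : ∀ (l : List Char) (acc : Nat),
    l.length ≤ fuel → PySem.Chars.count.go [d] fuel l acc = acc + l.count d := by
  induction fuel with
  | zero =>
    intro l acc h
    have : l = [] := List.eq_nil_of_length_eq_zero (by omega)
    subst this
    simp [PySem.Chars.count.go]
  | succ n ih =>
    intro l acc h
    cases l with
    | nil => simp [PySem.Chars.count.go]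
    | cons c t =>
      rw [PySem.Chars.count.go]
      by_cases hc : c = d
      · subst hc
        rw [if_pos (by simp [List.isPrefixOf])]
        simp only [List.length_cons] at h
        rw [ih _ _ (by simp; omega)]
        simp
        omega
      · rw [if_neg (by simp [List.isPrefixOf]; exact fun e => hc e.symm)]
        simp only [List.length_cons] at h
        rw [ih _ _ (by omega)]
        simp [hc]

theorem count_singleton (s : List Char) (d : Char) :
    PySem.Chars.count s [d] = s.count d := by
  rw [PySem.Chars.count, if_neg (by simp)]
  simpa using count_go_singleton d s.length s 0 le_rfl

theorem singleton_prefix_iff (d : Char) (l : List Char) :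
    [d] <+: l ↔ l.head? = some d := by
  cases l with
  | nil => simp
  | cons x t => simp [List.cons_prefix_cons, eq_comm]

theorem find_singleton_not_mem (l : List Char) (d : Char) (h : d ∉ l) :
    PySem.Chars.find l [d] = -1 := by
  rw [PySem.Chars.find_eq_neg_one_iff]
  intro hinf
  exact h (hinf.mem (by simp))

-- s.find(d) at the first occurrence: if d ∉ a then (a ++ d :: b).find(d) = len(a)
theorem find_singleton_split (a b : List Char) (d : Char) (h : d ∉ a) :
    PySem.Chars.find (a ++ d :: b) [d] = (a.length : Int) := by
  set s := a ++ d :: b with hs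
  have hinf : [d] <:+: s := ⟨a, b, by simp [hs]⟩
  have h0 : 0 ≤ PySem.Chars.find s [d] := (PySem.Chars.find_nonneg_iff _ _).mpr hinf
  obtain ⟨hpre, hmin⟩ := PySem.Chars.find_spec h0
  have key : ∀ i : Nat, ([d] <+: s.drop i) ↔ s[i]? = some d := by
    intro i
    rw [singleton_prefix_iff, List.head?_drop]
  have hat : s[a.length]? = some d := by
    rw [hs, List.getElem?_append_right le_rfl]
    simp
  have hne : ∀ i : Nat, i < a.length → s[i]? ≠ some d := by
    intro i hi e
    rw [hs, List.getElem?_append_left hi] at e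
    exact h (by
      obtain ⟨hlt, he⟩ := List.getElem?_eq_some_iff.mp e
      exact he ▸ List.getElem_mem _)
  set t := (PySem.Chars.find s [d]).toNat with ht
  have hfind : PySem.Chars.find s [d] = (t : Int) := (Int.toNat_of_nonneg h0).symm
  rcases lt_trichotomy t a.length with hlt | heq | hgt
  · exact absurd ((key t).mp hpre) (hne t hlt)
  · rw [hfind, heq]
  · exact absurd ((key a.length).mpr hat) (hmin a.length hgt)

-- A's index loop over range(i, j) checks the digit property of the slice cs[i:j]
theorem scanA_range (cs : List Char) (n : Nat) :
    ∀ i j : Nat, j - i = n → i ≤ j → j ≤ cs.length →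
      pvScanA cs (PySem.List.pyRange (i : Int) (j : Int) 1) = ((cs.drop i).take (j - i)).all pvDigit := by
  induction n with
  | zero =>
    intro i j hn hij hj
    have : i = j := by omega
    subst this
    rw [PySem.List.pyRange_one_eq_nil le_rfl]
    simp [pvScanA]
  | succ n ih =>
    intro i j hn hij hj
    have hlt : i < j := by omega
    rw [PySem.List.pyRange_one_cons (by exact_mod_cast hlt)]
    have hi : i < cs.length := by omega
    have hget : PySem.List.pyGet? cs (i : Int) = some cs[i] := by
      rw [PySem.List.pyGet?_natCast]
      exact List.getElem?_eq_getElem hi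
    rw [pvScanA, hget]
    simp only
    have htake : (cs.drop i).take (j - i) = cs[i] :: (cs.drop (i+1)).take (j - (i+1)) := by
      rw [List.drop_eq_getElem_cons hi]
      have : j - i = (j - (i+1)) + 1 := by omega
      rw [this, List.take_succ_cons]
    rw [htake, List.all_cons, pvIsDigitA_eq]
    by_cases hd : pvDigit cs[i]
    · rw [if_neg (by simp [hd])]
      have : ((i : Int) + 1) = ((i + 1 : Nat) : Int) := by push_cast; ring
      rw [this, ih (i+1) j (by omega) (by omega) hj]
      simp [hd]
    · rw [if_pos (by simp [Bool.eq_false_iff.mpr hd])]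
      simp [Bool.eq_false_iff.mpr hd]

theorem scanB_nodot (l : List Char) (h : '.' ∉ l) : ∀ m, pvScanB l false m = false := by
  induction l with
  | nil => intro m; simp [pvScanB]
  | cons c t ih =>
    intro m
    simp only [List.mem_cons, not_or] at h
    simp only [pvScanB, if_neg (show ¬ c = '.' from fun e => h.1 e.symm)]
    split
    · exact ih h.2 _
    · rfl

theorem scanB_dot_seen (l : List Char) (h : '.' ∈ l) : ∀ m, pvScanB l true m = false := by
  induction l with
  | nil => simp at h
  | cons c t ih =>
    intro m
    by_cases hc : c = '.'
    · simp [pvScanB, hc]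
    · rcases List.mem_cons.mp h with h1|h1
      · exact absurd h1.symm hc
      · simp only [pvScanB, if_neg hc]
        split
        · exact ih h1 _
        · rfl

theorem scanB_two_dots (l : List Char) (h : 2 ≤ l.count '.') : ∀ seen m, pvScanB l seen m = false := by
  induction l with
  | nil => simp at h
  | cons c t ih =>
    intro seen m
    by_cases hc : c = '.'
    · subst hc
      cases seen with
      | true => simp [pvScanB]
      | false =>
        simp only [pvScanB, Bool.false_eq_true, if_false]
        have ht : '.' ∈ t := by
          have := h; rw [List.count_cons_self] at this
          exact List.count_pos_iff.mp (by omega)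
        exact scanB_dot_seen t ht _
    · have h' : 2 ≤ t.count '.' := by simpa [List.count_cons, hc] using h
      simp only [pvScanB, if_neg hc]
      split
      · exact ih h' _ _
      · rfl

theorem scanB_after_dot (q : List Char) (h : '.' ∉ q) : ∀ m, pvScanB q true m = (q.all pvDigit && decide (0 < m)) := by
  induction q with
  | nil => intro m; simp [pvScanB]
  | cons c t ih =>
    intro m
    simp only [List.mem_cons, not_or] at h
    simp only [pvScanB, if_neg (show ¬ c = '.' from fun e => h.1 e.symm), List.all_cons]
    by_cases hd : pvDigit c
    · simp [hd, ih h.2 m]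
    · simp [hd]

theorem scanB_before_dot (p : List Char) (h : '.' ∉ p) : ∀ (r : List Char) (m : Nat),
    pvScanB (p ++ r) false m = if p.all pvDigit then pvScanB r false (m + p.length) else false := by
  induction p with
  | nil => intro r m; simp
  | cons c t ih =>
    intro r m
    simp only [List.mem_cons, not_or] at h
    simp only [List.cons_append, pvScanB, if_neg (show ¬ c = '.' from fun e => h.1 e.symm), List.all_cons]
    by_cases hd : pvDigit c
    · simp only [Bool.false_eq_true, if_false]
      rw [if_pos hd, ih h.2 r (m+1)]
      simp only [hd, Bool.true_and, List.length_cons]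
      split <;> [skip; rfl]
      congr 1
      omega
    · simp [hd]

theorem first_occ_split (l : List Char) (a : Char) (h : a ∈ l) :
    ∃ p q, l = p ++ a :: q ∧ a ∉ p := by
  induction l with
  | nil => simp at h
  | cons x t ih =>
    by_cases hx : x = a
    · exact ⟨[], t, by simp [hx], by simp⟩
    · obtain ⟨p, q, rfl, hp⟩ := ih ((List.mem_cons.mp h).resolve_left (fun e => hx e.symm))
      exact ⟨x :: p, q, rfl, by simp [List.mem_cons, hp]; exact fun e => hx e.symm⟩

-- ===== VERDICT (by name: the statement is the Claim_ definition above) =====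
theorem is_HTTP_Version_spec : Claim_equal_is_HTTP_Version := by
  intro octet _dom
  unfold Spec_is_HTTP_Version is_HTTP_Version is_HTTP_Version_alt
  set cs := octet.toList with hcsdef
  have hH : "HTTP/".toList = ['H','T','T','P','/'] := by decide
  have hslice : PySem.Chars.slice cs (some 0) (some 5) = cs.take 5 := by
    rw [PySem.Chars.slice_eq_listSlice, PySem.List.slice_zero_start]
    exact_mod_cast PySem.List.slice_to_natCast cs 5
  by_cases hpre : "HTTP/".toList <+: cs
  · -- prefix matches
    obtain ⟨rest, hrest⟩ := hpre
    have hpre' : "HTTP/".toList <+: cs := ⟨rest, hrest⟩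
    have htake : cs.take 5 = "HTTP/".toList := by
      have := List.prefix_iff_eq_take.mp hpre'
      rw [hH] at this ⊢
      simpa using this.symm
    rw [if_neg (by rw [hslice, htake]; simp)]
    rw [if_neg (show ¬((!PySem.Chars.startswith cs "HTTP/".toList) = true) from by
      have hsw : PySem.Chars.startswith cs "HTTP/".toList = true := (PySem.Chars.startswith_iff _ _).mpr hpre'
      rw [hsw]; simp)]
    have hdrop5 : PySem.Chars.slice cs (some 5) none = rest := by
      rw [PySem.Chars.slice_eq_listSlice]
      have h5 : PySem.List.slice cs (some ((5:Nat):Int)) none = cs.drop 5 :=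
        PySem.List.slice_from_natCast cs 5
      rw [show ((5:Nat):Int) = (5:Int) from rfl] at h5
      rw [h5, ← hrest, hH]
      rfl
    rw [hdrop5]
    have hcount : PySem.Chars.count cs ['.'] = rest.count '.' := by
      rw [count_singleton, ← hrest, List.count_append, hH]
      have hz : List.count '.' ['H','T','T','P','/'] = 0 := by decide
      omega
    have hlen : cs.length = 5 + rest.length := by
      rw [← hrest, List.length_append, hH]
      rfl
    rcases Nat.lt_or_ge 1 (rest.count '.') with h2 | hle
    · -- two or more dots: both false
      rw [if_pos (show 1 < PySem.Chars.count cs ['.'] from by rw [hcount]; exact h2)]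
      exact (scanB_two_dots rest (by omega) false 0).symm
    · rw [if_neg (show ¬(1 < PySem.Chars.count cs ['.']) from by rw [hcount]; omega)]
      rcases Nat.eq_zero_or_pos (rest.count '.') with h0 | hposc
      · -- no dot: A fails in the second loop at index 0 ('H'); B never sees a dot
        have hnd : '.' ∉ rest := by
          intro hm; have := List.count_pos_iff.mpr hm; omega
        have hndcs : '.' ∉ cs := by
          rw [← hrest]
          simp only [List.mem_append, not_or]
          exact ⟨by rw [hH]; decide, hnd⟩
        have hfind : PySem.Chars.find cs ['.'] = -1 := find_singleton_not_mem cs '.' hndcs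
        rw [hfind]
        rw [if_neg (show ¬((-1:Int) = 5) from by norm_num)]
        rw [PySem.List.pyRange_one_eq_nil (show (-1:Int) ≤ 5 from by norm_num)]
        rw [show pvScanA cs [] = true from rfl]
        rw [if_neg (show ¬(true = false) from by simp)]
        have hpos : (0:Int) < (cs.length : Int) := by rw [hlen]; push_cast; omega
        have hget0 : PySem.List.pyGet? cs (0:Int) = some 'H' := by
          rw [show (0:Int) = ((0:Nat):Int) from rfl, PySem.List.pyGet?_natCast, ← hrest, hH]
          rfl
        have hscan0 : pvScanA cs (PySem.List.pyRange (-1 + 1) (cs.length : Int) 1) = false := by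
          rw [show (-1 + 1 : Int) = 0 from rfl, PySem.List.pyRange_one_cons hpos, pvScanA, hget0]
          simp only
          rw [if_pos (show pvIsDigitA ['H'] = false from by decide)]
        rw [if_pos hscan0]
        exact (scanB_nodot rest hnd 0).symm
      · -- exactly one dot
        have h1 : rest.count '.' = 1 := by omega
        have hmem : '.' ∈ rest := List.count_pos_iff.mp hposc
        obtain ⟨p, q, hpq, hnp⟩ := first_occ_split rest '.' hmem
        have hnq : '.' ∉ q := by
          intro hm
          have hcp : p.count '.' = 0 := List.count_eq_zero.mpr hnp
          have hcq := List.count_pos_iff.mpr hm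
          rw [hpq, List.count_append, List.count_cons_self, hcp] at h1
          omega
        have hcs2 : cs = ("HTTP/".toList ++ p) ++ '.' :: q := by
          rw [← hrest, hpq, List.append_assoc]
        have hnpH : '.' ∉ "HTTP/".toList ++ p := by
          simp only [List.mem_append, not_or]
          exact ⟨by rw [hH]; decide, hnp⟩
        have hfind : PySem.Chars.find cs ['.'] = ((5 + p.length : Nat) : Int) := by
          rw [hcs2, find_singleton_split _ q '.' hnpH]
          rw [List.length_append, hH]
          norm_num
        have hlen2 : cs.length = 5 + p.length + 1 + q.length := by
          rw [hcs2]
          simp [List.length_append, hH]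
          omega
        have hdropcs : cs.drop 5 = rest := by
          rw [← hrest, hH]; rfl
        by_cases hp : p = []
        · -- empty major: A returns at find == 5; B ends with major_len = 0
          subst hp
          rw [if_pos (show PySem.Chars.find cs ['.'] = 5 from by rw [hfind]; norm_num)]
          rw [hpq]
          simp only [List.nil_append]
          rw [show pvScanB ('.' :: q) false 0 = pvScanB q true 0 from by simp [pvScanB]]
          rw [scanB_after_dot q hnq 0]
          simp
        · have hplen : 0 < p.length := List.length_pos_iff.mpr hp
          have hloop1 : pvScanA cs (PySem.List.pyRange 5 (PySem.Chars.find cs ['.']) 1) = p.all pvDigit := by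
            rw [hfind, show (5:Int) = ((5:Nat):Int) from rfl,
              scanA_range cs p.length 5 (5 + p.length) (by omega) (by omega) (by omega),
              hdropcs, hpq, show 5 + p.length - 5 = p.length from by omega, List.take_left]
          have hloop2 : pvScanA cs (PySem.List.pyRange (PySem.Chars.find cs ['.'] + 1) (cs.length : Int) 1) = q.all pvDigit := by
            rw [hfind, show (((5 + p.length : Nat) : Int) + 1) = ((5 + p.length + 1 : Nat) : Int) from by push_cast; ring,
              scanA_range cs q.length (5 + p.length + 1) cs.length (by omega) (by omega) (by omega)]
            have hdq : cs.drop (5 + p.length + 1) = q := by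
              rw [hcs2]
              have hlA : ("HTTP/".toList ++ p).length = 5 + p.length := by
                rw [List.length_append, hH]; rfl
              rw [show 5 + p.length + 1 = ("HTTP/".toList ++ p).length + 1 from by rw [hlA]]
              rw [show (("HTTP/".toList ++ p) ++ '.' :: q) = (("HTTP/".toList ++ p) ++ ['.']) ++ q from by simp]
              rw [show ("HTTP/".toList ++ p).length + 1 = (("HTTP/".toList ++ p) ++ ['.']).length from by simp]
              exact List.drop_left
            rw [hdq, show cs.length - (5 + p.length + 1) = q.length from by omega, List.take_length]
          rw [if_neg (show ¬(PySem.Chars.find cs ['.'] = 5) from by rw [hfind]; push_cast; omega)]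
          have hB : pvScanB rest false 0 = (p.all pvDigit && q.all pvDigit) := by
            rw [hpq, scanB_before_dot p hnp ('.' :: q) 0]
            by_cases hpa : p.all pvDigit
            · rw [if_pos hpa]
              rw [show pvScanB ('.' :: q) false (0 + p.length) = pvScanB q true (0 + p.length) from by simp [pvScanB]]
              rw [scanB_after_dot q hnq]
              simp [hpa, hplen]
            · simp [hpa]
          rw [hB]
          by_cases hpa : p.all pvDigit
          · rw [if_neg (show ¬(pvScanA cs (PySem.List.pyRange 5 (PySem.Chars.find cs ['.']) 1) = false) from by rw [hloop1]; simp [hpa])]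
            by_cases hqa : q.all pvDigit
            · rw [if_neg (show ¬(pvScanA cs (PySem.List.pyRange (PySem.Chars.find cs ['.'] + 1) (cs.length : Int) 1) = false) from by rw [hloop2]; simp [hqa])]
              simp [hpa, hqa]
            · rw [if_pos (show pvScanA cs (PySem.List.pyRange (PySem.Chars.find cs ['.'] + 1) (cs.length : Int) 1) = false from by rw [hloop2]; exact Bool.eq_false_iff.mpr hqa)]
              simp [hpa, hqa]
          · rw [if_pos (show pvScanA cs (PySem.List.pyRange 5 (PySem.Chars.find cs ['.']) 1) = false from by rw [hloop1]; exact Bool.eq_false_iff.mpr hpa)]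
            simp [hpa]
  · -- prefix does not match: both short-circuit to False
    have h1 : cs.take 5 ≠ "HTTP/".toList := by
      intro e
      exact hpre (by
        rw [List.prefix_iff_eq_take]
        rw [hH] at e ⊢
        simpa using e.symm)
    rw [if_pos (by rw [hslice]; exact h1)]
    have hsw0 : PySem.Chars.startswith cs "HTTP/".toList = false := by
      rw [Bool.eq_false_iff]
      intro hb
      exact hpre ((PySem.Chars.startswith_iff _ _).mp hb)
    rw [if_pos (show (!PySem.Chars.startswith cs "HTTP/".toList) = true from by rw [hsw0]; rfl)]
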